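-- pv_equiv track=rewrite | github.com/Teeeeg/AlgorithmOA | OnSite/Aug6MS2.py | solution
-- ===== SOURCE A (Python) =====
-- def solution(S):
--     # move all R to the middle
--     if not S:
--         return 0
--
--     n = len(S)
--     redIndexs = []
--     for i in range(n):
--         if S[i] == 'R':
--             redIndexs.append(i)
--
--     if not redIndexs:
--         return 0
--
--     left = 0
--     right = len(redIndexs) - 1
--     res = 0
--
--     while left < right:
--         # move R to middle will swap the time of the count of W
--         # count of the W can be calculated with two R's index length - the count of R
--         res += (redIndexs[right] - redIndexs[left]) - (right - left)
--         left += 1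
--         right -= 1
--
--     return -1 if res > 10**9 else res
-- ===== SOURCE B (Python) =====
-- def solution(S):
--     # median-of-relative-positions formulation: cost = sum |q_i - median(q)|, q_i = redIndex_i - i
--     if not S:
--         return 0
--     q = [i - k for k, i in enumerate(i for i, c in enumerate(S) if c == 'R')]
--     if not q:
--         return 0
--     m = q[len(q) // 2]
--     res = sum(abs(x - m) for x in q)
--     return -1 if res > 10**9 else res
-- ===== Notes on version B (the rewrite author's own statement) =====
-- stated objective: alternative
-- what changed: Replaces A's shrinking two-pointer loop that sums pairwise gaps (redIndexs[right]-redIndexs[left])-(right-left) with a closed one-pass formula: the cost equals the sum of absolute deviations of the R's relative positions q_i = index_i - i from their median q[len(q)//2]; the guards and the >10**9 clamp are kept.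
import Mathlib
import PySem

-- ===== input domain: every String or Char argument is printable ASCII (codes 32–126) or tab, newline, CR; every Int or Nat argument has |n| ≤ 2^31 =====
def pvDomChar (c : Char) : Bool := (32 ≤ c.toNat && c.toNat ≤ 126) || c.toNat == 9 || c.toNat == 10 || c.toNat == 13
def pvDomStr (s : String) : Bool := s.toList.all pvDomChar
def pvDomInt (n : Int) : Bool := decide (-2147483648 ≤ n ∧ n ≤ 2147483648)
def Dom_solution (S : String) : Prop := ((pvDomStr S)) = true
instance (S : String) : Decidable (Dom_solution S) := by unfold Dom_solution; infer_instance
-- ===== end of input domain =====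

-- B replaces A's shrinking two-pointer pairwise-gap loop by a closed one-pass formula:
-- the cost is the sum of absolute deviations of the R's relative positions from their median.
-- Same return value everywhere (both are total); objective: alternative decomposition.

-- ===== PORT A =====
-- the 'while left < right' loop of A, step for step
def solutionLoopA (red : List Int) (left right : Nat) (res : Int) : Int :=
  if left < right then
    solutionLoopA red (left + 1) (right - 1)
      (res + ((red.getD right 0 - red.getD left 0) - ((right : Int) - (left : Int))))
  else res
termination_by right - left

def solution (S : String) : Int :=
  if S.toList.isEmpty then 0
  else
    let n : Int := S.toList.length
    let redIndexs : List Int :=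
      (PySem.List.pyRange 0 n 1).foldl
        (fun acc i => if PySem.List.pyGetD S.toList i ' ' == 'R' then acc ++ [i] else acc) []
    if redIndexs.isEmpty then 0
    else
      let res := solutionLoopA redIndexs 0 (redIndexs.length - 1) 0
      if res > 10 ^ 9 then -1 else res

-- ===== PORT B =====
def solution_alt (S : String) : Int :=
  if S.toList.isEmpty then 0
  else
    let q : List Int :=
      (PySem.List.enumerate
          ((PySem.List.enumerate S.toList 0).filterMap
            (fun p => if p.2 == 'R' then some p.1 else none)) 0).map
        (fun p => p.2 - p.1)
    if q.isEmpty then 0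
    else
      let m := q.getD (q.length / 2) 0
      let res := (q.map (fun x => |x - m|)).sum
      if res > 10 ^ 9 then -1 else res

-- ===== PRECONDITION & SPEC =====
def Spec_solution (S : String) (out : Int) : Prop := out = solution_alt S
instance (S : String) (out : Int) : Decidable (Spec_solution S out) := by unfold Spec_solution; infer_instance

-- ===== CLAIM (what is proved, stated in full; the proofs are below) =====
def Claim_equal_solution : Prop := ∀ (S : String), Dom_solution S → Spec_solution S (solution S)

-- ===== LEMMAS AND PROOFS =====

-- the list q of relative positions red[k] - k
def qOf (red : List Int) : List Int :=
  (PySem.List.enumerate red 0).map (fun p => p.2 - p.1)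

-- total pairwise two-pointer sum, peeling first and last
def pairSum : List Int → Int
  | [] => 0
  | [_] => 0
  | a :: b :: rest => ((b :: rest).getLastD 0 - a) + pairSum ((b :: rest).dropLast)
termination_by l => l.length
decreasing_by simp

lemma qOf_length (red : List Int) : (qOf red).length = red.length := by
  simp [qOf]

lemma qOf_get (red : List Int) (k : Nat) (hk : k < red.length) :
    (qOf red)[k]'(by simp [qOf_length, hk]) = red[k] - (k : Int) := by
  simp [qOf, PySem.List.getElem_enumerate]

lemma pairSum_nil : pairSum [] = 0 := by rw [pairSum]

lemma pairSum_one (a : Int) : pairSum [a] = 0 := by rw [pairSum]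

lemma pairSum_cons2 (a b : Int) (rest : List Int) :
    pairSum (a :: b :: rest) = ((b :: rest).getLastD 0 - a) + pairSum ((b :: rest).dropLast) := by
  rw [pairSum]

lemma pairSum_cons_concat (a z : Int) (mid : List Int) :
    pairSum (a :: (mid ++ [z])) = (z - a) + pairSum mid := by
  cases mid with
  | nil => simp [pairSum_cons2, pairSum_nil]
  | cons m0 ms =>
    show pairSum (a :: m0 :: (ms ++ [z])) = _
    rw [pairSum_cons2]
    have h1 : m0 :: (ms ++ [z]) = (m0 :: ms) ++ [z] := by simp
    rw [h1, List.getLastD_concat, List.dropLast_concat]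

-- one peeling step of the median-deviation sum, on a decomposed sorted list
lemma median_step (a z : Int) (mid : List Int)
    (IH : (mid.map (fun x => |x - mid.getD (mid.length / 2) 0|)).sum = pairSum mid)
    (hsort : (a :: (mid ++ [z])).Pairwise (· ≤ ·)) :
    ((a :: (mid ++ [z])).map
        (fun x => |x - (a :: (mid ++ [z])).getD ((a :: (mid ++ [z])).length / 2) 0|)).sum
      = pairSum (a :: (mid ++ [z])) := by
  rcases mid with _ | ⟨c, ms⟩
  · -- two-element list [a, z]
    have haz : a ≤ z := by
      have := (List.pairwise_cons.mp hsort).1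
      simp at this; exact this
    have h1 : |a - z| = z - a := by rw [abs_sub_comm]; exact abs_of_nonneg (by omega)
    simp [pairSum_cons2, pairSum_nil, h1]
  · set mid := c :: ms with hmiddef
    have hml : 0 < mid.length := by simp [hmiddef]
    have hkm : mid.length / 2 < mid.length := by omega
    have hk : (a :: (mid ++ [z])).length / 2 = mid.length / 2 + 1 := by
      simp; omega
    have hmd : (a :: (mid ++ [z])).getD ((a :: (mid ++ [z])).length / 2) 0
        = mid.getD (mid.length / 2) 0 := by
      rw [hk, List.getD_cons_succ,
          List.getD_eq_getElem _ _ (by simp; omega),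
          List.getD_eq_getElem _ _ hkm,
          List.getElem_append_left hkm]
    set m := mid.getD (mid.length / 2) 0 with hmdef
    have hmmem : m ∈ mid := by
      rw [hmdef, List.getD_eq_getElem _ _ hkm]; exact List.getElem_mem _
    have hpc := List.pairwise_cons.mp hsort
    have ham : a ≤ m := hpc.1 m (by simp [hmmem])
    have hmz : m ≤ z := by
      have happ := (List.pairwise_append.mp hpc.2).2.2
      exact happ m hmmem z (by simp)
    have habs1 : |a - m| = m - a := by rw [abs_sub_comm]; exact abs_of_nonneg (by omega)
    have habs2 : |z - m| = z - m := abs_of_nonneg (by omega)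
    rw [hmd, pairSum_cons_concat]
    simp only [List.map_cons, List.map_append, List.map_cons, List.map_nil,
      List.sum_cons, List.sum_append, List.sum_cons, List.sum_nil]
    rw [habs1, habs2, IH]
    ring

-- median absolute deviation sum equals pairSum, for a nondecreasing list
lemma median_aux (n : Nat) : ∀ (q : List Int), q.length ≤ n → q.Pairwise (· ≤ ·) →
    (q.map (fun x => |x - q.getD (q.length / 2) 0|)).sum = pairSum q := by
  induction n with
  | zero =>
    intro q hq _
    have : q = [] := List.eq_nil_of_length_eq_zero (Nat.le_zero.mp hq)
    subst this; simp [pairSum_nil]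
  | succ n ih =>
    intro q hlen hsort
    rcases q with _ | ⟨a, t⟩
    · simp [pairSum_nil]
    rcases t with _ | ⟨b, rest⟩
    · simp [pairSum_one]
    have htne : (b :: rest) ≠ [] := by simp
    have hdec : b :: rest = (b :: rest).dropLast ++ [(b :: rest).getLast htne] :=
      (List.dropLast_append_getLast htne).symm
    set mid := (b :: rest).dropLast with hmiddef
    set z := (b :: rest).getLast htne with hzdef
    have hq2 : a :: b :: rest = a :: (mid ++ [z]) := by rw [← hdec]
    rw [hq2] at hsort ⊢
    have hmlen : mid.length ≤ n := by
      have : mid.length = rest.length := by simp [hmiddef]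
      have hlen' : rest.length + 2 ≤ n + 1 := by simpa using hlen
      omega
    have hmid_sorted : mid.Pairwise (· ≤ ·) :=
      ((List.pairwise_cons.mp hsort).2).sublist (List.sublist_append_left _ _)
    exact median_step a z mid (ih mid hmlen hmid_sorted) hsort

lemma median_eq_pairSum (q : List Int) (hsort : q.Pairwise (· ≤ ·)) :
    (q.map (fun x => |x - q.getD (q.length / 2) 0|)).sum = pairSum q :=
  median_aux q.length q le_rfl hsort

-- segment of q between the two pointers, inclusive
def seg (q : List Int) (l r : Nat) : List Int := (q.drop l).take (r + 1 - l)

lemma seg_self (q : List Int) (l : Nat) (hl : l < q.length) :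
    seg q l l = [q[l]'hl] := by
  unfold seg
  have h1 : l + 1 - l = 1 := by omega
  rw [h1, List.take_one, List.head?_drop, List.getElem?_eq_getElem hl]
  rfl

lemma seg_peel (q : List Int) (l r : Nat) (hlr : l < r) (hr : r < q.length) :
    seg q l r = q[l]'(by omega) :: ((seg q (l + 1) (r - 1)) ++ [q[r]'hr]) := by
  unfold seg
  have h0 : r + 1 - l = (r - l - 1 + 1) + 1 := by omega
  have h2 : r - 1 + 1 - (l + 1) = r - l - 1 := by omega
  have hidx : l + 1 + (r - l - 1) = r := by omega
  rw [h0, h2, List.drop_eq_getElem_cons (show l < q.length by omega), List.take_succ_cons,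
      List.take_add_one, List.getElem?_drop, hidx, List.getElem?_eq_getElem hr]
  rfl

lemma loopA_eq (red : List Int) : ∀ (k l r : Nat) (res : Int), r - l ≤ k → l ≤ r → r < red.length →
    solutionLoopA red l r res = res + pairSum (seg (qOf red) l r) := by
  intro k
  induction k with
  | zero =>
    intro l r res hk hlr hr
    have : l = r := by omega
    subst this
    rw [solutionLoopA]
    simp only [lt_irrefl, if_false]
    rw [seg_self _ _ (by rw [qOf_length]; exact hr)]
    simp [pairSum_one]
  | succ k ih =>
    intro l r res hk hlr hr
    rcases Nat.eq_or_lt_of_le hlr with heq | hlt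
    · subst heq
      rw [solutionLoopA]
      simp only [lt_irrefl, if_false]
      rw [seg_self _ _ (by rw [qOf_length]; exact hr)]
      simp [pairSum_one]
    · rw [solutionLoopA]
      simp only [hlt, if_true]
      have hql : (qOf red).length = red.length := qOf_length red
      have hinc : red.getD r 0 - red.getD l 0 - ((r : Int) - (l : Int))
          = (qOf red)[r]'(by omega) - (qOf red)[l]'(by omega) := by
        rw [qOf_get _ _ hr, qOf_get _ _ (by omega)]
        rw [List.getD_eq_getElem _ _ hr, List.getD_eq_getElem _ _ (show l < red.length by omega)]
        ring
      rcases Nat.lt_or_ge (l + 1) r with hcase | hcase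
      · -- l + 1 ≤ r - 1
        have hstep := ih (l + 1) (r - 1) (res + (red.getD r 0 - red.getD l 0 - ((r : Int) - (l : Int)))) (by omega) (by omega) (by omega)
        rw [hstep]
        rw [seg_peel (qOf red) l r hlt (by omega), pairSum_cons_concat]
        rw [hinc]; ring
      · -- r = l + 1 : inner loop stops immediately
        have hrl : r = l + 1 := by omega
        subst hrl
        simp only [Nat.add_sub_cancel]
        rw [solutionLoopA, if_neg (by omega : ¬ (l + 1 < l))]
        rw [seg_peel (qOf red) l (l + 1) hlt (by omega), pairSum_cons_concat]
        have hnil : seg (qOf red) (l + 1) (l + 1 - 1) = [] := by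
          unfold seg; simp
        rw [hnil, pairSum_nil, hinc]
        ring

-- filterMap with an if-guard is filter
lemma filterMap_if_eq_filter {α : Type} (p : α → Bool) (l : List α) :
    l.filterMap (fun x => if p x then some x else none) = l.filter p := by
  induction l with
  | nil => rfl
  | cons a t ih =>
    simp only [List.filterMap_cons, List.filter_cons]
    by_cases h : p a <;> simp [h, ih]

-- red lists built by A and B coincide
lemma red_eq (chars : List Char) :
    (PySem.List.pyRange 0 (chars.length : Int) 1).foldl
        (fun acc i => if PySem.List.pyGetD chars i ' ' == 'R' then acc ++ [i] else acc) []
      = (PySem.List.enumerate chars 0).filterMap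
          (fun p => if p.2 == 'R' then some p.1 else none) := by
  have hlen : PySem.List.len chars = (chars.length : Int) := by simp [PySem.List.len]
  rw [PySem.List.enumerate_eq_map_pyRange chars ' ', List.filterMap_map, hlen,
      PySem.List.foldl_append_if_eq_filter (fun i => PySem.List.pyGetD chars i ' ' == 'R'),
      ← filterMap_if_eq_filter]
  rfl

-- q is nondecreasing, since red is strictly increasing
lemma q_sorted (red : List Int) (hred : red.Pairwise (· < ·)) :
    (qOf red).Pairwise (· ≤ ·) := by
  rw [List.pairwise_iff_getElem]
  intro i j hi hj hij
  rw [qOf_length] at hi hj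
  rw [qOf_get red i (by omega), qOf_get red j hj]
  have key : ∀ m (hm : m < red.length), i ≤ m → red[i]'(by omega) + ((m : Int) - i) ≤ red[m]'hm := by
    intro m
    induction m with
    | zero =>
      intro hm him
      have h0 : i = 0 := by omega
      subst h0; simp
    | succ m ihm =>
      intro hm him
      rcases Nat.eq_or_lt_of_le him with heq | hlt
      · subst heq; simp
      · have h1 := ihm (by omega) (by omega)
        have h2 : red[m]'(by omega) < red[m + 1]'hm :=
          List.pairwise_iff_getElem.mp hred m (m + 1) (by omega) hm (by omega)
        push_cast at h1 ⊢
        omega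
  have hk := key j hj (by omega)
  omega

-- the ports agree on every input
theorem solution_spec_aux (S : String) : solution S = solution_alt S := by
  unfold solution solution_alt
  by_cases hS : S.toList.isEmpty
  · simp [hS]
  · simp only [hS, Bool.false_eq_true, if_false]
    rw [red_eq S.toList]
    set red := (PySem.List.enumerate S.toList 0).filterMap
      (fun p => if p.2 == 'R' then some p.1 else none) with hreddef
    have hq : (PySem.List.enumerate red 0).map (fun p => p.2 - p.1) = qOf red := rfl
    rw [hq]
    by_cases hr : red.isEmpty
    · have : red = [] := List.isEmpty_iff.mp hr
      simp [this, qOf]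
    · have hrne : red ≠ [] := fun h => hr (by simp [h])
      have hlen : 0 < red.length := List.length_pos_iff.mpr hrne
      have hqlen : (qOf red).length = red.length := qOf_length red
      have hqne : ¬ (qOf red).isEmpty := by
        simp only [List.isEmpty_iff];
        intro h
        have := hqlen; rw [h] at this; simp at this; omega
      simp only [hr, hqne, Bool.false_eq_true, if_false]
      have hloop := loopA_eq red red.length 0 (red.length - 1) 0 (by omega) (by omega) (by omega)
      have hseg : seg (qOf red) 0 (red.length - 1) = qOf red := by
        unfold seg
        rw [List.drop_zero, List.take_of_length_le (by omega)]
      rw [hloop, hseg, zero_add]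
      have hpair : red.Pairwise (· < ·) := by
        rw [hreddef]
        exact (PySem.List.pairwise_lt_enumerate S.toList 0).filterMap _
          (by
            intro a a' hlt b hb b' hb'
            by_cases h2 : a.2 == 'R' <;> simp [h2] at hb
            by_cases h2' : a'.2 == 'R' <;> simp [h2'] at hb'
            rw [← hb, ← hb']; exact hlt)
      rw [median_eq_pairSum (qOf red) (q_sorted red hpair)]

-- ===== VERDICT (by name: the statement is the Claim_ definition above) =====
theorem solution_spec : Claim_equal_solution := by
  intro S _
  unfold Spec_solution
  exact solution_spec_aux S
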